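-- pv_equiv track=rewrite | github.com/leifeggenfellner/advent-of-code | python/2025/day_06/part2.py | part2
-- ===== SOURCE A (Python) =====
-- def part2(data: list[str]) -> int:
--     lines = [line.rstrip() for line in data]
--
--     operators = lines[-1]
--     num_rows = lines[:-1]
--
--     max_width = max(len(line) for line in num_rows)
--     num_rows = [line.ljust(max_width) for line in num_rows]
--
--     total = 0
--     current_numbers = []
--     current_op = None
--
--     for col_idx in range(max_width - 1, -1, -1):
--         col = ''.join(num_rows[row_idx][col_idx] for row_idx in range(len(num_rows)))
--         operator = operators[col_idx] if col_idx < len(operators) else ' '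
--
--         if col.strip() == '' and operator == ' ':
--             if current_numbers:
--                 if current_op == '+':
--                     result = sum(current_numbers)
--                 else:
--                     result = 1
--                     for num in current_numbers:
--                         result *= num
--                 total += result
--                 current_numbers = []
--                 current_op = None
--         else:
--             digit_str = ''.join(c for c in col if c.isdigit())
--             if digit_str:
--                 current_numbers.append(int(digit_str))
--             if operator in ('+', '*'):
--                 current_op = operator
--
--     if current_numbers:
--         if current_op == '+':
--             result = sum(current_numbers)
--         else:
--             result = 1
--             for num in current_numbers:
--                 result *= num
--         total += result
--
--     return total
-- ===== SOURCE B (Python) =====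
-- def _prod(nums):
--     r = 1
--     for n in nums:
--         r *= n
--     return r
--
--
-- def part2(data: list[str]) -> int:
--     lines = [line.rstrip() for line in data]
--     operators = lines[-1]
--     rows = lines[:-1]
--     width = max(len(r) for r in rows)
--
--     # transpose into full column strings plus the operator char of each column
--     cols = [''.join(r[i] if i < len(r) else ' ' for r in rows) for i in range(width)]
--     ops = [operators[i] if i < len(operators) else ' ' for i in range(width)]
--
--     # split the columns into groups; a separator is a blank column whose operator char is a space
--     groups = []
--     cur = []
--     for col, op in zip(cols, ops):
--         if col.strip() == '' and op == ' ':
--             groups.append(cur)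
--             cur = []
--         else:
--             cur.append((col, op))
--     groups.append(cur)
--
--     # evaluate the groups right to left; a group with an operator but no numbers
--     # passes its operator on to the group at its left
--     total = 0
--     carry = None
--     for g in reversed(groups):
--         gops = [o for _, o in g if o in '+*']
--         op = gops[0] if gops else carry
--         digs = [''.join(c for c in col if c.isdigit()) for col, _ in g]
--         nums = [int(d) for d in digs if d]
--         if nums:
--             total += sum(nums) if op == '+' else _prod(nums)
--             carry = None
--         else:
--             carry = op
--     return total
-- ===== Notes on version B (the rewrite author's own statement) =====
-- stated objective: alternative
-- what changed: A evaluates the grid with one right-to-left character loop over column indices mutating (total, current_numbers, current_op); B first transposes the grid into column strings, splits the columns into separator-delimited groups, and then evaluates the groups right to left (leftmost '+'/'*' of a group wins, a number-less group passes its operator to the group at its left, exactly as A's retained state behaves).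
import Mathlib
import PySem

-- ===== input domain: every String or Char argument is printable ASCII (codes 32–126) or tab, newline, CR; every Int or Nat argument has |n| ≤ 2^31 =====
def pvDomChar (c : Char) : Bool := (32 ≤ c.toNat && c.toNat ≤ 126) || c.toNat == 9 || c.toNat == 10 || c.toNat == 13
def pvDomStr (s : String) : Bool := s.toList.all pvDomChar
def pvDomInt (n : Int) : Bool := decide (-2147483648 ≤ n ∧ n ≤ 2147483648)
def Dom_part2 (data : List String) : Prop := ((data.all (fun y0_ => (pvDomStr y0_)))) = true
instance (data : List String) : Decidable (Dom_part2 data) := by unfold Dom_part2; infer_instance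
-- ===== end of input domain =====

-- B replaces A's single right-to-left character-level loop by a different decomposition of the
-- same task (alternative, similar cost): transpose the grid into columns, split the columns into
-- separator-delimited groups, then evaluate the groups right to left.

-- ===== PORT A =====
-- the four preprocessing lines shared verbatim by both Pythons:
-- lines = [line.rstrip() for line in data]; operators = lines[-1]; rows = lines[:-1];
-- width = max(len(line) for line in rows)   → (rows, operators, width)
-- lines[-1] (IndexError on []) and max (ValueError on []) are the raises Pre_ excludes; getD totalizes them
def pvGrid (data : List String) : List (List Char) × List Char × Int :=
  let lines := data.map (fun l => PySem.Chars.rstrip l.toList)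
  let operators := (PySem.List.pyGet? lines (-1)).getD []
  let rows := PySem.List.slice lines none (some (-1))
  let width := (PySem.List.max? (rows.map (fun l => (l.length : Int))) (fun x => x)).getD 0
  (rows, operators, width)

-- operators[col_idx] if col_idx < len(operators) else ' '   (this expression appears verbatim in both Pythons)
def pvOpAt (operators : List Char) (col_idx : Int) : Char :=
  if col_idx < (operators.length : Int) then PySem.List.pyGetD operators col_idx ' ' else ' '

-- result = 1; for num in nums: result *= num   (A inline; B's helper _prod is the same loop)
def pvProd (nums : List Int) : Int := nums.foldl (· * ·) 1

-- col = ''.join(num_rows[row_idx][col_idx] for row_idx in range(len(num_rows)))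
-- (both indexings are always in range here — rows are padded to max_width — so the pyGetD defaults never surface)
def pvColA (num_rows : List (List Char)) (col_idx : Int) : List Char :=
  (PySem.List.pyRange 0 (num_rows.length : Int)).map
    (fun row_idx => PySem.List.pyGetD (PySem.List.pyGetD num_rows row_idx []) col_idx ' ')

-- the body of A's `for col_idx in range(max_width - 1, -1, -1)` loop; state = (total, current_numbers, current_op)
def pvStepA (num_rows : List (List Char)) (operators : List Char)
    (s : Int × List Int × Option Char) (col_idx : Int) : Int × List Int × Option Char :=
  let col := pvColA num_rows col_idx
  let operator := pvOpAt operators col_idx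
  if PySem.Chars.strip col == [] && operator == ' ' then
    if s.2.1 ≠ [] then
      let result := if s.2.2 == some '+' then s.2.1.sum else pvProd s.2.1
      (s.1 + result, [], none)
    else s
  else
    let digit_str := col.filter PySem.Chars.isdigit
    -- int(digit_str): digit_str is nonempty and all digits here, so ofChars? is `some`
    let nums := if digit_str ≠ [] then s.2.1 ++ [(PySem.Int.ofChars? digit_str).getD 0] else s.2.1
    let op := if operator == '+' || operator == '*' then some operator else s.2.2
    (s.1, nums, op)

def part2 (data : List String) : Int :=
  let g := pvGrid data
  -- num_rows = [line.ljust(max_width) for line in num_rows]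
  let num_rows := g.1.map (fun l => l ++ List.replicate (g.2.2.toNat - l.length) ' ')
  let r := (PySem.List.pyRange (g.2.2 - 1) (-1) (-1)).foldl (pvStepA num_rows g.2.1)
    ((0, [], none) : Int × List Int × Option Char)
  if r.2.1 ≠ [] then
    r.1 + (if r.2.2 == some '+' then r.2.1.sum else pvProd r.2.1)
  else r.1

-- ===== PORT B =====
-- one column of the transpose: ''.join(r[i] if i < len(r) else ' ' for r in rows)
def pvColB (rows : List (List Char)) (i : Int) : List Char :=
  rows.map (fun r => if i < (r.length : Int) then PySem.List.pyGetD r i ' ' else ' ')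

-- the body of B's group-building loop; state = (groups, cur)
def pvGroupStep (st : List (List (List Char × Char)) × List (List Char × Char))
    (p : List Char × Char) : List (List (List Char × Char)) × List (List Char × Char) :=
  if PySem.Chars.strip p.1 == [] && p.2 == ' ' then (st.1 ++ [st.2], [])
  else (st.1, st.2 ++ [p])

-- the body of B's `for g in reversed(groups)` loop; state = (total, carry)
def pvEvalStep (tc : Int × Option Char) (g : List (List Char × Char)) : Int × Option Char :=
  let gops := (g.map Prod.snd).filter (fun o => o == '+' || o == '*')
  let op : Option Char := match gops with | [] => tc.2 | o :: _ => some o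
  let digs := g.map (fun p => p.1.filter PySem.Chars.isdigit)
  let nums := (digs.filter (fun d => !d.isEmpty)).map (fun d => (PySem.Int.ofChars? d).getD 0)
  if nums ≠ [] then
    (tc.1 + (if op == some '+' then nums.sum else pvProd nums), none)
  else (tc.1, op)

def part2_alt (data : List String) : Int :=
  let g := pvGrid data
  let cols := (PySem.List.pyRange 0 g.2.2).map (pvColB g.1)
  let ops := (PySem.List.pyRange 0 g.2.2).map (pvOpAt g.2.1)
  let st := (cols.zip ops).foldl pvGroupStep ([], [])
  let groups := st.1 ++ [st.2]
  (groups.reverse.foldl pvEvalStep (0, none)).1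

-- ===== PRECONDITION & SPEC =====
-- Pre_ excludes only the inputs where Python A raises: data = [] (lines[-1] → IndexError) and
-- single-line data (max() over the empty num_rows → ValueError).
def Pre_part2 (data : List String) : Prop := 2 ≤ data.length
instance (data : List String) : Decidable (Pre_part2 data) := by unfold Pre_part2; infer_instance

def pvWitness_part2 : List String := ["1 2", "+"]

def Spec_part2 (data : List String) (out : Int) : Prop := out = part2_alt data
instance (data : List String) (out : Int) : Decidable (Spec_part2 data out) := by unfold Spec_part2; infer_instance

-- ===== CLAIM (what is proved, stated in full; the proofs are below) =====
def Claim_equal_part2 : Prop := ∀ (data : List String), Dom_part2 data → Pre_part2 data → Spec_part2 data (part2 data)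

-- ===== LEMMAS AND PROOFS =====

-- Abstract column summary: (is-separator, number contributed, operator contributed).
abbrev pvS : Type := Bool × Option Int × Option Char

def pvEval (nums : List Int) (op : Option Char) : Int :=
  if op == some '+' then nums.sum else pvProd nums

-- A's loop body, expressed on a column summary
def pvAStep (s : Int × List Int × Option Char) (c : pvS) : Int × List Int × Option Char :=
  if c.1 then
    (if s.2.1 ≠ [] then (s.1 + pvEval s.2.1 s.2.2, ([] : List Int), (none : Option Char)) else s)
  else
    (s.1, s.2.1 ++ c.2.1.toList, match c.2.2 with | some o => some o | none => s.2.2)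

-- split a list at separators: (first group, later groups)
def pvSplit {α : Type} (sep : α → Bool) : List α → List α × List (List α)
  | [] => ([], [])
  | c :: cs =>
    let p := pvSplit sep cs
    if sep c then ([], p.1 :: p.2) else (c :: p.1, p.2)

def pvNums (g : List pvS) : List Int := g.filterMap (fun c => c.2.1)
def pvOps (g : List pvS) : List Char := g.filterMap (fun c => c.2.2)

-- B's group-evaluation step, on summaries
def pvGStep (tc : Int × Option Char) (g : List pvS) : Int × Option Char :=
  let op : Option Char := match pvOps g with | [] => tc.2 | o :: _ => some o
  if pvNums g ≠ [] then (tc.1 + pvEval (pvNums g) op, none) else (tc.1, op)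

def pvF (gs : List (List pvS)) : Int × Option Char :=
  gs.foldr (fun g tc => pvGStep tc g) (0, none)

-- summary of one of A's columns
def pvSumm (num_rows : List (List Char)) (operators : List Char) (i : Int) : pvS :=
  (PySem.Chars.strip (pvColA num_rows i) == [] && pvOpAt operators i == ' ',
   (let ds := (pvColA num_rows i).filter PySem.Chars.isdigit
    if !ds.isEmpty then some ((PySem.Int.ofChars? ds).getD 0) else none),
   (if pvOpAt operators i == '+' || pvOpAt operators i == '*' then some (pvOpAt operators i) else none))

-- summary of one of B's (column, op) pairs
def pvSummP (p : List Char × Char) : pvS :=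
  (PySem.Chars.strip p.1 == [] && p.2 == ' ',
   (let ds := p.1.filter PySem.Chars.isdigit
    if !ds.isEmpty then some ((PySem.Int.ofChars? ds).getD 0) else none),
   (if p.2 == '+' || p.2 == '*' then some p.2 else none))

lemma pvEval_reverse (l : List Int) (op : Option Char) : pvEval l.reverse op = pvEval l op := by
  unfold pvEval pvProd
  rw [List.sum_reverse_int, ← List.prod_eq_foldl, ← List.prod_eq_foldl, List.prod_reverse]

-- a comprehension `[h x for x in map f l if q x]` as a filterMap
lemma pv_filterMap_ite {α β γ : Type} (f : α → β) (q : β → Bool) (h : β → γ) (l : List α) :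
    l.filterMap (fun x => if q (f x) then some (h (f x)) else none) = ((l.map f).filter q).map h := by
  induction l with
  | nil => rfl
  | cons a t ih => by_cases hq : q (f a) = true <;> simp [hq, ih]

lemma pvStepA_eq_summ (NR : List (List Char)) (OPS : List Char)
    (s : Int × List Int × Option Char) (i : Int) :
    pvStepA NR OPS s i = pvAStep s (pvSumm NR OPS i) := by
  unfold pvStepA pvAStep pvSumm pvEval
  by_cases hd : (pvColA NR i).filter PySem.Chars.isdigit = [] <;>
  by_cases ho : (pvOpAt OPS i == '+' || pvOpAt OPS i == '*') = true <;>
    simp only [hd, ho, List.isEmpty_nil, Bool.not_true, Bool.false_eq_true, if_false, if_true,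
      ne_eq] <;>
    split_ifs <;> simp_all

lemma pvF_cons (g : List pvS) (gs : List (List pvS)) : pvF (g :: gs) = pvGStep (pvF gs) g := rfl

-- the central invariant: A's right-to-left fold, described by B's group decomposition
lemma pv_invariant (cs : List pvS) :
    cs.foldr (fun c s => pvAStep s c) ((0, [], none) : Int × List Int × Option Char)
      = ((pvF (pvSplit (fun c => c.1) cs).2).1,
         (pvNums (pvSplit (fun c => c.1) cs).1).reverse,
         (match pvOps (pvSplit (fun c => c.1) cs).1 with
          | o :: _ => some o
          | [] => (pvF (pvSplit (fun c => c.1) cs).2).2)) := by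
  induction cs with
  | nil => rfl
  | cons c cs ih =>
    obtain ⟨b, n?, o?⟩ := c
    set p := pvSplit (fun c => c.1) cs with hp
    by_cases hb : b = true
    · have hsplit : pvSplit (fun c => c.1) ((b, n?, o?) :: cs) = ([], p.1 :: p.2) := by
        simp [pvSplit, hb, ← hp]
      rw [List.foldr_cons, ih, hsplit]
      by_cases hn : pvNums p.1 = []
      · simp only [pvAStep, hb, if_true, ne_eq, pvF_cons, pvGStep, pvNums, pvOps]
        have hn' : List.filterMap (fun c => c.2.1) p.1 = [] := hn
        cases List.filterMap (fun c => c.2.2) p.1 <;> simp [hn']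
      · simp only [pvAStep, hb, if_true, pvF_cons, pvGStep]
        rw [if_pos (by simp [hn]), if_pos hn, pvEval_reverse]
        simp only [pvNums, pvOps]
        cases List.filterMap (fun c => c.2.2) p.1 <;> rfl
    · have hsplit : pvSplit (fun c => c.1) ((b, n?, o?) :: cs) = ((b, n?, o?) :: p.1, p.2) := by
        simp [pvSplit, hb, ← hp]
      rw [List.foldr_cons, ih, hsplit]
      simp only [Bool.not_eq_true] at hb
      simp only [pvAStep, hb, Bool.false_eq_true, if_false]
      cases n? <;> cases o? <;>
        simp [pvNums, pvOps]

-- B's group-building fold produces exactly pvSplit's groups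
lemma pv_build (xs : List (List Char × Char))
    (gs : List (List (List Char × Char))) (cur : List (List Char × Char)) :
    (let st := xs.foldl pvGroupStep (gs, cur)
     st.1 ++ [st.2])
      = gs ++ (cur ++ (pvSplit (fun p => PySem.Chars.strip p.1 == [] && p.2 == ' ') xs).1)
          :: (pvSplit (fun p => PySem.Chars.strip p.1 == [] && p.2 == ' ') xs).2 := by
  induction xs generalizing gs cur with
  | nil => simp [pvSplit]
  | cons c cs ih =>
    simp only [List.foldl_cons, pvSplit]
    by_cases h : (PySem.Chars.strip c.1 == [] && c.2 == ' ') = true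
    · simp only [pvGroupStep, h, if_pos, ih]
      simp
    · simp only [pvGroupStep, h, ih]
      simp

lemma pvSplit_map {α β : Type} (f : α → β) (sep : β → Bool) (xs : List α) :
    pvSplit sep (xs.map f)
      = ((pvSplit (fun x => sep (f x)) xs).1.map f,
         (pvSplit (fun x => sep (f x)) xs).2.map (List.map f)) := by
  induction xs with
  | nil => rfl
  | cons c cs ih =>
    simp only [List.map_cons, pvSplit, ih]
    by_cases h : sep (f c) <;> simp [h]

lemma pvOps_map (g : List (List Char × Char)) :
    pvOps (g.map pvSummP) = (g.map Prod.snd).filter (fun o => o == '+' || o == '*') := by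
  unfold pvOps
  rw [List.filterMap_map]
  have := pv_filterMap_ite Prod.snd (fun o => o == '+' || o == '*') (fun o => o) g
  simp only [List.map_id'] at this
  rw [← this]
  rfl

lemma pvNums_map (g : List (List Char × Char)) :
    pvNums (g.map pvSummP)
      = ((g.map (fun p => p.1.filter PySem.Chars.isdigit)).filter (fun d => !d.isEmpty)).map
          (fun d => (PySem.Int.ofChars? d).getD 0) := by
  unfold pvNums
  rw [List.filterMap_map]
  rw [← pv_filterMap_ite (fun p => p.1.filter PySem.Chars.isdigit) (fun d => !d.isEmpty)
    (fun d => (PySem.Int.ofChars? d).getD 0) g]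
  rfl

lemma pvEvalStep_eq (tc : Int × Option Char) (g : List (List Char × Char)) :
    pvEvalStep tc g = pvGStep tc (g.map pvSummP) := by
  unfold pvEvalStep pvGStep pvEval
  rw [pvOps_map, pvNums_map]

-- padded-row access = guarded access (the two ports read the same column characters)
lemma pv_col_entry (r : List Char) (i W : Int) (hlen : (r.length : Int) ≤ W)
    (h0 : 0 ≤ i) (hW : i < W) :
    PySem.List.pyGetD (r ++ List.replicate (W.toNat - r.length) ' ') i ' '
      = if i < (r.length : Int) then PySem.List.pyGetD r i ' ' else ' ' := by
  rw [PySem.List.pyGetD_of_nonneg _ _ h0, PySem.List.pyGetD_of_nonneg _ _ h0]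
  by_cases hlt : i < (r.length : Int)
  · rw [if_pos hlt]
    have hn : i.toNat < r.length := by omega
    simp [List.getD, List.getElem?_append_left hn]
  · rw [if_neg hlt]
    have hge : r.length ≤ i.toNat := by omega
    have hsm : i.toNat - r.length < W.toNat - r.length := by omega
    simp [List.getD, List.getElem?_append_right hge, hsm]

-- flushing A's final state = evaluating the first group
lemma pv_flush (css : List pvS) :
    (let r := css.foldr (fun c s => pvAStep s c) ((0, [], none) : Int × List Int × Option Char)
     if r.2.1 ≠ [] then r.1 + (if r.2.2 == some '+' then r.2.1.sum else pvProd r.2.1) else r.1)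
      = (pvF ((pvSplit (fun c => c.1) css).1 :: (pvSplit (fun c => c.1) css).2)).1 := by
  simp only [pv_invariant, pvF_cons, pvGStep]
  by_cases hn : pvNums (pvSplit (fun c => c.1) css).1 = []
  · have hn' : List.filterMap (fun c => c.2.1) (pvSplit (fun c => c.1) css).1 = [] := hn
    simp [pvNums, pvOps, hn']
  · rw [if_pos (by simp [hn]), if_pos hn]
    have he := pvEval_reverse (pvNums (pvSplit (fun c => c.1) css).1)
      (match pvOps (pvSplit (fun c => c.1) css).1 with
       | o :: _ => some o
       | [] => (pvF (pvSplit (fun c => c.1) css).2).2)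
    simp only [pvEval] at he
    rw [he]
    cases pvOps (pvSplit (fun c => c.1) css).1 <;> rfl
lemma pv_col_eq (rows : List (List Char)) (W i : Int)
    (hlen : ∀ r ∈ rows, (r.length : Int) ≤ W) (h0 : 0 ≤ i) (hW : i < W) :
    pvColA (rows.map (fun l => l ++ List.replicate (W.toNat - l.length) ' ')) i = pvColB rows i := by
  unfold pvColA pvColB
  have h1 : (PySem.List.pyRange 0 ((rows.map (fun l => l ++ List.replicate (W.toNat - l.length) ' ')).length : Int)).map
      (fun row_idx => PySem.List.pyGetD (rows.map (fun l => l ++ List.replicate (W.toNat - l.length) ' ')) row_idx [])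
      = rows.map (fun l => l ++ List.replicate (W.toNat - l.length) ' ') :=
    PySem.List.map_pyGetD_pyRange_zero' _ []
  have h2 : (PySem.List.pyRange 0 ((rows.map (fun l => l ++ List.replicate (W.toNat - l.length) ' ')).length : Int)).map
      (fun row_idx => PySem.List.pyGetD (PySem.List.pyGetD (rows.map (fun l => l ++ List.replicate (W.toNat - l.length) ' ')) row_idx []) i ' ')
      = ((PySem.List.pyRange 0 ((rows.map (fun l => l ++ List.replicate (W.toNat - l.length) ' ')).length : Int)).map
          (fun row_idx => PySem.List.pyGetD (rows.map (fun l => l ++ List.replicate (W.toNat - l.length) ' ')) row_idx [])).map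
          (fun row => PySem.List.pyGetD row i ' ') := by
    rw [List.map_map]; rfl
  rw [h2, h1, List.map_map]
  apply List.map_congr_left
  intro r hr
  exact pv_col_entry r i W (hlen r hr) h0 hW

lemma pvGrid_len (data : List String) :
    ∀ r ∈ (pvGrid data).1, (r.length : Int) ≤ (pvGrid data).2.2 := by
  intro r hr
  unfold pvGrid at hr ⊢
  simp only at hr ⊢
  cases hmax : PySem.List.max?
      ((PySem.List.slice (data.map (fun l => PySem.Chars.rstrip l.toList)) none (some (-1))).map
        (fun l => (l.length : Int))) (fun x => x) with
  | none =>
    rw [PySem.List.max?_eq_none_iff] at hmax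
    simp only [List.map_eq_nil_iff] at hmax
    rw [hmax] at hr
    simp at hr
  | some m =>
    simp only [Option.getD_some]
    exact PySem.List.max?_isMax hmax _ (List.mem_map_of_mem hr)
lemma pv_summ_eq (rows : List (List Char)) (OPS : List Char) (W i : Int)
    (hlen : ∀ r ∈ rows, (r.length : Int) ≤ W) (h0 : 0 ≤ i) (hW : i < W) :
    pvSummP (pvColB rows i, pvOpAt OPS i)
      = pvSumm (rows.map (fun l => l ++ List.replicate (W.toNat - l.length) ' ')) OPS i := by
  unfold pvSumm pvSummP
  rw [pv_col_eq rows W i hlen h0 hW]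

lemma pv_sides (rows : List (List Char)) (OPS : List Char) (W : Int)
    (hlen : ∀ r ∈ rows, (r.length : Int) ≤ W) :
    (let num_rows := rows.map (fun l => l ++ List.replicate (W.toNat - l.length) ' ')
     let r := (PySem.List.pyRange (W - 1) (-1) (-1)).foldl (pvStepA num_rows OPS)
       ((0, [], none) : Int × List Int × Option Char)
     if r.2.1 ≠ [] then r.1 + (if r.2.2 == some '+' then r.2.1.sum else pvProd r.2.1) else r.1)
    = (let cols := (PySem.List.pyRange 0 W).map (pvColB rows)
       let ops := (PySem.List.pyRange 0 W).map (pvOpAt OPS)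
       let st := (cols.zip ops).foldl pvGroupStep ([], [])
       let groups := st.1 ++ [st.2]
       (groups.reverse.foldl pvEvalStep (0, none)).1) := by
  simp only []
  -- name the common abstract column-summary list
  have hWW : W - 1 + 1 = W := by ring
  have h01 : (-1 : Int) + 1 = 0 := by norm_num
  rw [PySem.List.pyRange_neg_one_eq_reverse, hWW, h01, List.foldl_reverse]
  simp only [pvStepA_eq_summ]
  have hm : ∀ (l : List Int) (b : Int × List Int × Option Char),
      List.foldr (fun x y => pvAStep y
        (pvSumm (rows.map (fun l => l ++ List.replicate (W.toNat - l.length) ' ')) OPS x)) b l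
      = List.foldr (fun c s => pvAStep s c) b
          (l.map (pvSumm (rows.map (fun l => l ++ List.replicate (W.toNat - l.length) ' ')) OPS)) :=
    fun l b => by rw [List.foldr_map]
  rw [hm, pv_flush]
  -- B side
  rw [List.zip_map']
  have hb := pv_build ((PySem.List.pyRange 0 W).map (fun i => (pvColB rows i, pvOpAt OPS i))) [] []
  simp only [List.nil_append] at hb
  rw [hb, List.foldl_reverse]
  have he : (fun (x : List (List Char × Char)) (y : Int × Option Char) => pvEvalStep y x)
      = fun g tc => pvGStep tc (g.map pvSummP) := by
    funext g tc; exact pvEvalStep_eq tc g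
  rw [he]
  have hm2 : ∀ (gs : List (List (List Char × Char))),
      List.foldr (fun g tc => pvGStep tc (List.map pvSummP g)) (0, none) gs
        = pvF (gs.map (List.map pvSummP)) :=
    fun gs => by unfold pvF; rw [List.foldr_map]
  rw [hm2, List.map_cons]
  have hsep : (fun (x : List Char × Char) => (pvSummP x).1)
      = (fun p => PySem.Chars.strip p.1 == [] && p.2 == ' ') := rfl
  have hs := pvSplit_map pvSummP (fun c => c.1)
    (List.map (fun i => (pvColB rows i, pvOpAt OPS i)) (PySem.List.pyRange 0 W))
  rw [hsep] at hs
  have hs1 := congrArg Prod.fst hs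
  have hs2 := congrArg Prod.snd hs
  simp only at hs1 hs2
  rw [← hs1, ← hs2]
  have hcss : (List.map (fun i => (pvColB rows i, pvOpAt OPS i)) (PySem.List.pyRange 0 W)).map pvSummP
      = (PySem.List.pyRange 0 W).map
          (pvSumm (rows.map (fun l => l ++ List.replicate (W.toNat - l.length) ' ')) OPS) := by
    rw [List.map_map]
    apply List.map_congr_left
    intro i hi
    rw [PySem.List.mem_pyRange_one] at hi
    exact pv_summ_eq rows OPS W i hlen hi.1 hi.2
  rw [hcss]
theorem part2_eq_alt (data : List String) : part2 data = part2_alt data := by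
  have h := pv_sides (pvGrid data).1 (pvGrid data).2.1 (pvGrid data).2.2 (pvGrid_len data)
  unfold part2 part2_alt
  exact h

-- ===== VERDICT (by name: the statement is the Claim_ definition above) =====
theorem part2_spec : Claim_equal_part2 := by
  intro data _ _
  unfold Spec_part2
  exact part2_eq_alt data
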